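-- pv_equiv track=rewrite | github.com/PeterLuschny/tabl | src/_tablsimilarseq.py | ess_equal
-- ===== SOURCE A (Python) =====
-- def ess_equal(s: list[int], tt: list[int]) -> tuple[int, int, int]:
--
--     t = [abs(x) for x in tt]
--     K = min(len(t), len(s)) // 2
--     for i in range(K):
--         for k in range(K):
--             L = len(s[i: i + K])
--             if s[i: i + K] == t[k: k + L]:
--                 j = 0;
--                 while (i + j < len(s) and k + j < len(t)
--                         and s[i + j] == t[k + j]):
--                     j += 1
--                 return (i, k, j)
--     return (-1, -1, 0)
-- ===== SOURCE B (Python) =====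
-- def ess_equal(s: list[int], tt: list[int]) -> tuple[int, int, int]:
--     t = [abs(x) for x in tt]
--     K = min(len(t), len(s)) // 2
--     index = {}   # lazily built: first occurrence of each length-K block of t
--     built = 0    # blocks t[k:k+K] for k < built are in the index
--     for i in range(K):
--         key = tuple(s[i:i + K])
--         k = index.get(key)
--         while k is None and built < K:
--             bk = tuple(t[built:built + K])
--             if bk not in index:
--                 index[bk] = built
--             built += 1
--             k = index.get(key)
--         if k is not None:
--             j = 0
--             while i + j < len(s) and k + j < len(t) and s[i + j] == t[k + j]:
--                 j += 1
--             return (i, k, j)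
--     return (-1, -1, 0)
-- ===== Notes on version B (the rewrite author's own statement) =====
-- stated objective: faster
-- what changed: B builds a hash index (first occurrence of each length-K block of t) once and replaces A's inner scan over k with a single dict lookup per i.
import Mathlib
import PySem

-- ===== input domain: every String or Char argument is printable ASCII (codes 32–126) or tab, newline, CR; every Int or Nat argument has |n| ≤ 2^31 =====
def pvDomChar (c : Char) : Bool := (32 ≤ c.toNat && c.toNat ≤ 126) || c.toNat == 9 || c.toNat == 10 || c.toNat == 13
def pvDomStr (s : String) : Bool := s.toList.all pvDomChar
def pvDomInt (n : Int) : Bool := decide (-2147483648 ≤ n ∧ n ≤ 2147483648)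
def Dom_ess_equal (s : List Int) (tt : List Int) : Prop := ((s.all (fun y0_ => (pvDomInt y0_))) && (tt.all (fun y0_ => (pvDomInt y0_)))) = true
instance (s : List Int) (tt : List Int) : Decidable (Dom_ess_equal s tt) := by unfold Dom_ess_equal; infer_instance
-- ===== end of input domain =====

-- B replaces A's inner scan over k by a lazily grown dict of first occurrences of the length-K blocks of t (faster in a timing run).

-- ===== PORT A =====
-- the 'while' extension loop, identical character for character in A and in B (both ports use it)
def pvExtend (s t : List Int) (i k j : Nat) : Nat :=
  if h : i + j < s.length ∧ k + j < t.length ∧ s.getD (i + j) 0 = t.getD (k + j) 0 then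
    pvExtend s t i k (j + 1)
  else j
termination_by s.length - (i + j)
decreasing_by omega

-- A's inner 'for k in range(K)' with early return
def pvInnerA (s t : List Int) (K i k : Nat) : Option Nat :=
  if _h : k < K then
    let L := (PySem.List.slice s (some (i : Int)) (some ((i : Int) + (K : Int)))).length
    if PySem.List.slice s (some (i : Int)) (some ((i : Int) + (K : Int))) =
       PySem.List.slice t (some (k : Int)) (some ((k : Int) + (L : Int))) then some k
    else pvInnerA s t K i (k + 1)
  else none
termination_by K - k

-- A's outer 'for i in range(K)'
def pvOuterA (s t : List Int) (K i : Nat) : Int × Int × Int :=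
  if _h : i < K then
    match pvInnerA s t K i 0 with
    | some k => ((i : Int), (k : Int), (pvExtend s t i k 0 : Int))
    | none => pvOuterA s t K (i + 1)
  else (-1, -1, 0)
termination_by K - i

def ess_equal (s : List Int) (tt : List Int) : Int × Int × Int :=
  let t := tt.map (fun x => |x|)
  let K := min t.length s.length / 2
  pvOuterA s t K 0

-- ===== PORT B =====
-- B's 'while k is None and built < K' loop: grow the index until the key is found or all K blocks are in
def pvGrow (t : List Int) (K : Nat) (key : List Int) (k? : Option Nat)
    (D : PySem.Dict (List Int) Nat) (b : Nat) : Option Nat × PySem.Dict (List Int) Nat × Nat :=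
  if _h : k?.isNone ∧ b < K then
    let bk := PySem.List.slice t (some (b : Int)) (some ((b : Int) + (K : Int)))
    let D' := if D.contains bk then D else D.insert bk b
    pvGrow t K key (D'.get? key) D' (b + 1)
  else (k?, D, b)
termination_by K - b
decreasing_by omega

-- B's 'for i in range(K)' carrying the lazy index and its watermark 'built'
def pvOuterB (s t : List Int) (D : PySem.Dict (List Int) Nat) (b K i : Nat) : Int × Int × Int :=
  if _h : i < K then
    let key := PySem.List.slice s (some (i : Int)) (some ((i : Int) + (K : Int)))
    match pvGrow t K key (D.get? key) D b with
    | (some k, _, _) => ((i : Int), (k : Int), (pvExtend s t i k 0 : Int))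
    | (none, D', b') => pvOuterB s t D' b' K (i + 1)
  else (-1, -1, 0)
termination_by K - i

def ess_equal_alt (s : List Int) (tt : List Int) : Int × Int × Int :=
  let t := tt.map (fun x => |x|)
  let K := min t.length s.length / 2
  pvOuterB s t PySem.Dict.empty 0 K 0

-- ===== PRECONDITION & SPEC =====
def Spec_ess_equal (s : List Int) (tt : List Int) (out : Int × Int × Int) : Prop := out = ess_equal_alt s tt
instance (s : List Int) (tt : List Int) (out : Int × Int × Int) : Decidable (Spec_ess_equal s tt out) := by unfold Spec_ess_equal; infer_instance

-- ===== CLAIM (what is proved, stated in full; the proofs are below) =====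
def Claim_equal_ess_equal : Prop := ∀ (s : List Int) (tt : List Int), Dom_ess_equal s tt → Spec_ess_equal s tt (ess_equal s tt)

-- ===== LEMMAS AND PROOFS =====

-- proof-side: first k in [k, b) whose length-K block of t equals key
def pvFind (t : List Int) (K b k : Nat) (key : List Int) : Option Nat :=
  if _h : k < b then
    if PySem.List.slice t (some (k : Int)) (some ((k : Int) + (K : Int))) = key then some k
    else pvFind t K b (k + 1) key
  else none
termination_by b - k

-- proof-side: the index after the first b blocks have been offered (insert-if-absent, in order)
def pvUpto (t : List Int) (K b k : Nat) (D : PySem.Dict (List Int) Nat) : PySem.Dict (List Int) Nat :=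
  if _h : k < b then
    pvUpto t K b (k + 1)
      (if D.contains (PySem.List.slice t (some (k : Int)) (some ((k : Int) + (K : Int)))) then D
       else D.insert (PySem.List.slice t (some (k : Int)) (some ((k : Int) + (K : Int)))) k)
  else D
termination_by b - k

theorem pvUpto_get? (t : List Int) (K b : Nat) (key : List Int) :
    ∀ k D, (pvUpto t K b k D).get? key = (D.get? key).or (pvFind t K b k key) := by
  intro k
  induction' hk : b - k using Nat.strong_induction_on with n ih generalizing k
  intro D
  rw [pvUpto, pvFind]
  by_cases h : k < b
  · simp only [h, dif_pos]
    rw [ih (b - (k + 1)) (by omega) (k + 1) rfl]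
    by_cases heq : PySem.List.slice t (some (k : Int)) (some ((k : Int) + (K : Int))) = key
    · subst heq
      by_cases hc : D.contains (PySem.List.slice t (some (k : Int)) (some ((k : Int) + (K : Int))))
      · rw [if_pos hc]
        rw [PySem.Dict.contains_eq_isSome_get?] at hc
        cases hg : D.get? (PySem.List.slice t (some (k : Int)) (some ((k : Int) + (K : Int)))) with
        | none => rw [hg] at hc; simp at hc
        | some v => simp [Option.or]
      · rw [if_neg hc]
        rw [PySem.Dict.contains_eq_isSome_get?] at hc
        cases hg : D.get? (PySem.List.slice t (some (k : Int)) (some ((k : Int) + (K : Int)))) with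
        | none => simp [PySem.Dict.get?_insert_self, Option.or]
        | some v => rw [hg] at hc; simp at hc
    · rw [if_neg heq]
      by_cases hc : D.contains (PySem.List.slice t (some (k : Int)) (some ((k : Int) + (K : Int))))
      · rw [if_pos hc]
      · rw [if_neg hc, PySem.Dict.get?_insert_of_ne _ _ (fun h => heq h.symm)]
  · simp [h]

-- pvUpto with one more block: offer block b to the result (snoc form)
theorem pvUpto_succ (t : List Int) (K b : Nat) :
    ∀ k D, k ≤ b → pvUpto t K (b + 1) k D =
      (if (pvUpto t K b k D).contains (PySem.List.slice t (some (b : Int)) (some ((b : Int) + (K : Int)))) then pvUpto t K b k D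
       else (pvUpto t K b k D).insert (PySem.List.slice t (some (b : Int)) (some ((b : Int) + (K : Int)))) b) := by
  intro k
  induction' hk : b - k using Nat.strong_induction_on with n ih generalizing k
  intro D hkb
  by_cases h : k < b
  · rw [pvUpto, dif_pos (by omega),
      ih (b - (k + 1)) (by omega) (k + 1) rfl
        (if D.contains (PySem.List.slice t (some (k : Int)) (some ((k : Int) + (K : Int)))) then D
         else D.insert (PySem.List.slice t (some (k : Int)) (some ((k : Int) + (K : Int)))) k)
        (by omega)]
    conv_rhs => rw [pvUpto, dif_pos h]
  · have hkb' : k = b := by omega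
    subst hkb'
    rw [pvUpto, dif_pos (by omega)]
    conv_lhs => rw [pvUpto, dif_neg (by omega)]
    conv_rhs => rw [pvUpto, dif_neg (by omega)]

theorem pvFind_mono (t : List Int) (K b b' : Nat) (key : List Int) (hb : b ≤ b') (r : Nat) :
    ∀ k, pvFind t K b k key = some r → pvFind t K b' k key = some r := by
  intro k
  induction' hk : b - k using Nat.strong_induction_on with n ih generalizing k
  intro h
  rw [pvFind] at h
  by_cases hkb : k < b
  · rw [dif_pos hkb] at h
    rw [pvFind, dif_pos (by omega)]
    by_cases heq : PySem.List.slice t (some (k : Int)) (some ((k : Int) + (K : Int))) = key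
    · rw [if_pos heq] at h ⊢; exact h
    · rw [if_neg heq] at h ⊢; exact ih (b - (k + 1)) (by omega) (k + 1) rfl h
  · rw [dif_neg hkb] at h; exact absurd h (by simp)

-- pvGrow, started from the index of the first b blocks, returns the first match over all K blocks
theorem pvGrow_spec (t : List Int) (K : Nat) (key : List Int) :
    ∀ b, b ≤ K →
      ∃ b', b' ≤ K ∧
        pvGrow t K key ((pvUpto t K b 0 PySem.Dict.empty).get? key) (pvUpto t K b 0 PySem.Dict.empty) b =
          (pvFind t K K 0 key, pvUpto t K b' 0 PySem.Dict.empty, b') := by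
  intro b
  induction' hk : K - b using Nat.strong_induction_on with n ih generalizing b
  intro hbK
  rw [pvGrow]
  by_cases hsome : ((pvUpto t K b 0 PySem.Dict.empty).get? key).isSome
  · have hfind : (pvUpto t K b 0 PySem.Dict.empty).get? key = pvFind t K b 0 key := by
      rw [pvUpto_get?, PySem.Dict.get?_empty, Option.none_or]
    obtain ⟨r, hr⟩ := Option.isSome_iff_exists.mp hsome
    refine ⟨b, hbK, ?_⟩
    rw [dif_neg (by simp [hr])]
    rw [hfind] at hr
    rw [hfind, hr, pvFind_mono t K b K key hbK r 0 hr]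
  · have hnone : (pvUpto t K b 0 PySem.Dict.empty).get? key = none := by
      cases hg : (pvUpto t K b 0 PySem.Dict.empty).get? key with
      | none => rfl
      | some v => rw [hg] at hsome; simp at hsome
    by_cases hbK' : b < K
    · rw [dif_pos ⟨by simp [hnone], hbK'⟩]
      have hstep : (if (pvUpto t K b 0 PySem.Dict.empty).contains
            (PySem.List.slice t (some (b : Int)) (some ((b : Int) + (K : Int)))) then
            pvUpto t K b 0 PySem.Dict.empty
          else (pvUpto t K b 0 PySem.Dict.empty).insert
            (PySem.List.slice t (some (b : Int)) (some ((b : Int) + (K : Int)))) b) =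
          pvUpto t K (b + 1) 0 PySem.Dict.empty := by
        rw [pvUpto_succ t K b 0 PySem.Dict.empty (by omega)]
      simp only [hstep]
      exact ih (K - (b + 1)) (by omega) (b + 1) rfl (by omega)
    · have hbK'' : b = K := by omega
      subst hbK''
      refine ⟨b, le_refl b, ?_⟩
      rw [dif_neg (by omega)]
      rw [pvUpto_get?, PySem.Dict.get?_empty, Option.none_or]

theorem pvInnerA_eq_find (s t : List Int) (K i : Nat) (hi : i < K) (hs : 2 * K ≤ s.length) :
    ∀ k, pvInnerA s t K i k =
      pvFind t K K k (PySem.List.slice s (some (i : Int)) (some ((i : Int) + (K : Int)))) := by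
  have hL : (PySem.List.slice s (some (i : Int)) (some ((i : Int) + (K : Int)))).length = K := by
    rw [PySem.List.slice_natCast_add]
    simp [List.length_take, List.length_drop]
    omega
  intro k
  induction' hk : K - k using Nat.strong_induction_on with n ih generalizing k
  rw [pvInnerA, pvFind]
  by_cases h : k < K
  · simp only [h, dif_pos, hL]
    by_cases heq : PySem.List.slice s (some (i : Int)) (some ((i : Int) + (K : Int))) =
        PySem.List.slice t (some (k : Int)) (some ((k : Int) + (K : Int)))
    · rw [if_pos heq, if_pos heq.symm]
    · rw [if_neg heq, if_neg (fun h' => heq h'.symm), ih (K - (k + 1)) (by omega) (k + 1) rfl]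
  · simp [h]

theorem pvOuter_eq (s t : List Int) (K : Nat) (hs : 2 * K ≤ s.length) :
    ∀ i b, b ≤ K → pvOuterA s t K i = pvOuterB s t (pvUpto t K b 0 PySem.Dict.empty) b K i := by
  intro i
  induction' hk : K - i using Nat.strong_induction_on with n ih generalizing i
  intro b hbK
  rw [pvOuterA, pvOuterB]
  by_cases h : i < K
  · simp only [h, dif_pos]
    obtain ⟨b', hb'K, hgrow⟩ := pvGrow_spec t K
      (PySem.List.slice s (some (i : Int)) (some ((i : Int) + (K : Int)))) b hbK
    rw [hgrow, pvInnerA_eq_find s t K i h hs 0]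
    cases pvFind t K K 0 (PySem.List.slice s (some (i : Int)) (some ((i : Int) + (K : Int)))) with
    | some k => rfl
    | none => exact ih (K - (i + 1)) (by omega) (i + 1) rfl b' hb'K
  · simp [h]

-- ===== VERDICT (by name: the statement is the Claim_ definition above) =====
theorem ess_equal_spec : Claim_equal_ess_equal := by
  intro s tt _
  unfold Spec_ess_equal ess_equal ess_equal_alt
  have h0 : pvUpto (tt.map (fun x => |x|)) (min (tt.map (fun x => |x|)).length s.length / 2) 0 0
      PySem.Dict.empty = PySem.Dict.empty := by rw [pvUpto]; simp
  rw [← h0]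
  exact pvOuter_eq s (tt.map (fun x => |x|)) _ (by omega) 0 0 (by omega)
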